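-- pv_equiv track=rewrite | github.com/calledtoconstruct/maze | Python/version-1.0/maze_follower.py | step
-- ===== SOURCE A (Python) =====
-- def validate(maze):
--     start = 0
--     end = 0
--     for line in maze:
--         if "S" in line:
--             start = start + 1
--         if "E" in line:
--             end = end + 1
--     if start == 0 or end == 0:
--         raise ValueError()
--
-- def start(maze):
--     for y, line in enumerate(maze):
--         for x, current in enumerate(line):
--             if current == 'S':
--                 return current, x, y, []
--
-- def step(maze, cx = -1, cy = -1):
--     if cx == -1 or cy == -1:
--         validate(maze)
--         return start(maze)
--     options = []
--     for y, line in enumerate(maze):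
--         for x, current in enumerate(line):
--             if (cx == x and y in [cy-1, cy+1]) or (cy == y and x in [cx-1, cx+1]):
--                 if current == 'E':
--                     return "Victory!", x, y, []
--                 if current == ' ':
--                     options.append((x, y))
--     if len(options) > 0:
--         x, y = options.pop(0)
--         maze[cy] = maze[cy][0:cx] + '*' + maze[cy][cx+1:]
--         maze[y] = maze[y][0:x] + 'C' + maze[y][x+1:]
--         return ' ', x, y, options
--     return 'D', 0, 0, []
-- ===== SOURCE B (Python) =====
-- def step(maze, cx = -1, cy = -1):
--     if cx == -1 or cy == -1:
--         if not any('S' in line for line in maze) or not any('E' in line for line in maze):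
--             raise ValueError()
--         for y, line in enumerate(maze):
--             x = line.find('S')
--             if x >= 0:
--                 return 'S', x, y, []
--     options = []
--     for x, y in ((cx, cy - 1), (cx - 1, cy), (cx + 1, cy), (cx, cy + 1)):
--         if 0 <= y < len(maze) and 0 <= x < len(maze[y]):
--             c = maze[y][x]
--             if c == 'E':
--                 return "Victory!", x, y, []
--             if c == ' ':
--                 options.append((x, y))
--     if options:
--         x, y = options.pop(0)
--         maze[cy] = maze[cy][:cx] + '*' + maze[cy][cx+1:]
--         maze[y] = maze[y][:x] + 'C' + maze[y][x+1:]
--         return ' ', x, y, options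
--     return 'D', 0, 0, []
-- ===== Notes on version B (the rewrite author's own statement) =====
-- stated objective: faster
-- what changed: B inspects the four neighbour cells of (cx, cy) directly (in A's row-major scan order) instead of scanning every cell of the whole grid, and finds the start row by a per-line substring search instead of a char-by-char scan.
import Mathlib
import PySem

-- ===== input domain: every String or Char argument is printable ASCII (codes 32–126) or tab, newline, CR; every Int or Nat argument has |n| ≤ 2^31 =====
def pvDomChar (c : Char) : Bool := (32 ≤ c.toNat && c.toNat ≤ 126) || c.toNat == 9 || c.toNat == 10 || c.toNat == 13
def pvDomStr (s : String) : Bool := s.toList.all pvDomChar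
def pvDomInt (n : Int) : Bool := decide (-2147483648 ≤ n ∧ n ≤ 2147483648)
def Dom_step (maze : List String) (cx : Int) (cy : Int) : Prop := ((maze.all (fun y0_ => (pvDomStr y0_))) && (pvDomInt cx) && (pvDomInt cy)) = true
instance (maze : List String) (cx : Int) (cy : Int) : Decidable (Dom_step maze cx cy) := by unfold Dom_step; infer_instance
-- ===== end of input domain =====

-- B replaces A's O(W*H) full-grid scan per step by direct O(1) inspection of the four
-- neighbour cells in A's scan order. Both Pythons mutate `maze` in place on a ' '-move;
-- the equivalence proved here is about the RETURN value only (B performs the same mutation).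

-- ===== PORT A =====

-- "S" in line / "E" in line (length-1 substring test = char membership)
def lineHas (c : Char) (line : String) : Bool := line.toList.contains c

-- validate(maze): counts lines containing S / E; True = returns normally, False = raises
def validateA (maze : List String) : Bool :=
  let p := maze.foldl
    (fun (p : Int × Int) line =>
      (if lineHas 'S' line then p.1 + 1 else p.1,
       if lineHas 'E' line then p.2 + 1 else p.2)) (0, 0)
  !(p.1 == 0 || p.2 == 0)

-- inner loop of start(): scan chars of one line from index x
def startRowA (y : Int) : Int → List Char → Option (String × Int × Int × (List (Int × Int)))
  | _, [] => none
  | x, c :: cs => if c = 'S' then some (String.ofList [c], x, y, []) else startRowA y (x + 1) cs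

-- start(maze): row-major scan for 'S' (returns none only when no 'S', i.e. after validate raised)
def startA : Int → List String → Option (String × Int × Int × (List (Int × Int)))
  | _, [] => none
  | y, line :: rest =>
    match startRowA y 0 line.toList with
    | some r => some r
    | none => startA (y + 1) rest

-- inner loop of the grid scan: .inr (x,y) = early "Victory!" return at an 'E', .inl opts = fall through
def rowGoA (cx cy y : Int) : Int → List Char → List (Int × Int) → (List (Int × Int)) ⊕ (Int × Int)
  | _, [], opts => .inl opts
  | x, c :: cs, opts =>
    if (cx = x ∧ (y = cy - 1 ∨ y = cy + 1)) ∨ (cy = y ∧ (x = cx - 1 ∨ x = cx + 1)) then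
      if c = 'E' then .inr (x, y)
      else if c = ' ' then rowGoA cx cy y (x + 1) cs (opts ++ [(x, y)])
      else rowGoA cx cy y (x + 1) cs opts
    else rowGoA cx cy y (x + 1) cs opts

-- outer loop over the rows
def rowsGoA (cx cy : Int) : Int → List String → List (Int × Int) → (List (Int × Int)) ⊕ (Int × Int)
  | _, [], opts => .inl opts
  | y, line :: rest, opts =>
    match rowGoA cx cy y 0 line.toList opts with
    | .inr p => .inr p
    | .inl opts' => rowsGoA cx cy (y + 1) rest opts'

def step (maze : List String) (cx : Int) (cy : Int) : String × Int × Int × (List (Int × Int)) :=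
  if cx = -1 ∨ cy = -1 then
    if validateA maze then
      match startA 0 maze with
      | some r => r
      | none => ("", 0, 0, [])  -- unreachable: validate guarantees an 'S' (Python would return None)
    else ("", 0, 0, [])         -- Python raises ValueError here (outside Pre_step)
  else
    match rowsGoA cx cy 0 maze [] with
    | .inr (x, y) => ("Victory!", x, y, [])
    | .inl [] => ("D", 0, 0, [])
    | .inl ((x, y) :: rest) => (" ", x, y, rest)
    -- Python also mutates maze before the ' ' return (IndexError when cy = len(maze): outside Pre_step)

-- ===== PORT B =====

-- bounds-checked cell lookup: `0 <= y < len(maze) and 0 <= x < len(maze[y])`, then maze[y][x]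
def cellAtB (maze : List String) (x y : Int) : Option (Int × Int × Char) :=
  if 0 ≤ y ∧ 0 ≤ x then
    match maze[y.toNat]? with
    | none => none
    | some line =>
      match line.toList[x.toNat]? with
      | none => none
      | some c => some (x, y, c)
  else none

-- the `for y, line in enumerate(maze): if 'S' in line: return 'S', line.index('S'), y, []` loop
def findSB : Int → List String → String × Int × Int × (List (Int × Int))
  | _, [] => ("", 0, 0, [])     -- unreachable under the guard
  | y, line :: rest =>
    if lineHas 'S' line then
      ("S", ((PySem.List.index? line.toList 'S').getD 0 : Int), y, [])
    else findSB (y + 1) rest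

def step_alt (maze : List String) (cx : Int) (cy : Int) : String × Int × Int × (List (Int × Int)) :=
  if cx = -1 ∨ cy = -1 then
    if (maze.any (lineHas 'S')) && (maze.any (lineHas 'E')) then findSB 0 maze
    else ("", 0, 0, [])         -- Python raises ValueError here (outside Pre_step)
  else
    match ([(cx, cy - 1), (cx - 1, cy), (cx + 1, cy), (cx, cy + 1)].filterMap
        (fun p => cellAtB maze p.1 p.2)).find? (fun c => c.2.2 == 'E') with
    | some (x, y, _) => ("Victory!", x, y, [])
    | none =>
      match (([(cx, cy - 1), (cx - 1, cy), (cx + 1, cy), (cx, cy + 1)].filterMap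
          (fun p => cellAtB maze p.1 p.2)).filter (fun c => c.2.2 == ' ')).map
          (fun c => (c.1, c.2.1)) with
      | [] => ("D", 0, 0, [])
      | (x, y) :: rest => (" ", x, y, rest)

-- ===== PRECONDITION & SPEC =====
-- Pre_step excludes exactly the inputs on which A raises: the start branch (cx or cy = -1)
-- when the maze lacks an 'S' or an 'E' (validate raises ValueError), and the step branch when
-- cy = len(maze) and the cell (cx, cy-1) is ' ' (the in-place update maze[cy] raises IndexError).
def Pre_step (maze : List String) (cx : Int) (cy : Int) : Prop :=
  ((cx = -1 ∨ cy = -1) → (∃ l ∈ maze, 'S' ∈ l.toList) ∧ (∃ l ∈ maze, 'E' ∈ l.toList)) ∧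
  (¬(cx = -1 ∨ cy = -1) →
    ¬(cy = (maze.length : Int) ∧ maze ≠ [] ∧ 0 ≤ cx ∧
      (maze.getLast?.getD "").toList[cx.toNat]? = some ' '))
instance (maze : List String) (cx : Int) (cy : Int) : Decidable (Pre_step maze cx cy) := by
  unfold Pre_step; infer_instance

def pvWitness_step : List String × Int × Int := (["#S #", "#  E"], 1, 0)

def Spec_step (maze : List String) (cx : Int) (cy : Int) (out : String × Int × Int × (List (Int × Int))) : Prop := out = step_alt maze cx cy
instance (maze : List String) (cx : Int) (cy : Int) (out : String × Int × Int × (List (Int × Int))) : Decidable (Spec_step maze cx cy out) := by unfold Spec_step; infer_instance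

-- ===== CLAIM (what is proved, stated in full; the proofs are below) =====
def Claim_equal_step : Prop := ∀ (maze : List String) (cx : Int) (cy : Int), Dom_step maze cx cy → Pre_step maze cx cy → Spec_step maze cx cy (step maze cx cy)

-- ===== LEMMAS AND PROOFS =====

-- abstract processing of a list of matched cells: first 'E' wins, ' ' cells accumulate
def process : List (Int × Int × Char) → List (Int × Int) → (List (Int × Int)) ⊕ (Int × Int)
  | [], opts => .inl opts
  | (x, y, c) :: rest, opts =>
    if c = 'E' then .inr (x, y)
    else if c = ' ' then process rest (opts ++ [(x, y)])
    else process rest opts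

-- the cells of one row that A's predicate matches, in scan order
def rowCells (cx cy y : Int) : Int → List Char → List (Int × Int × Char)
  | _, [] => []
  | x, c :: cs =>
    (if (cx = x ∧ (y = cy - 1 ∨ y = cy + 1)) ∨ (cy = y ∧ (x = cx - 1 ∨ x = cx + 1))
     then [(x, y, c)] else []) ++ rowCells cx cy y (x + 1) cs

def allCells (cx cy : Int) : Int → List String → List (Int × Int × Char)
  | _, [] => []
  | y, line :: rest => rowCells cx cy y 0 line.toList ++ allCells cx cy (y + 1) rest

-- the (at most one) cell of a row at absolute column t, when the row starts at column x0
def cellAtOff (y t x0 : Int) (chars : List Char) : List (Int × Int × Char) :=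
  if x0 ≤ t then
    match chars[(t - x0).toNat]? with
    | some c => [(t, y, c)]
    | none => []
  else []

-- the (at most one) cell of the grid at (x, y), when the grid starts at row y0
def gridAt (maze : List String) (x y y0 : Int) : List (Int × Int × Char) :=
  if y0 ≤ y then
    match maze[(y - y0).toNat]? with
    | some line => cellAtOff y x 0 line.toList
    | none => []
  else []

theorem rowGoA_eq_process (cx cy y : Int) (chars : List Char) (x : Int) (opts : List (Int × Int)) :
    rowGoA cx cy y x chars opts = process (rowCells cx cy y x chars) opts := by
  induction chars generalizing x opts with
  | nil => rfl
  | cons c cs ih =>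
    simp only [rowGoA, rowCells]
    split_ifs with h hE hSp
    · simp [process, hE]
    · simp [process, hSp, ih]
    · simp [process, hE, hSp, ih]
    · simp [ih]

theorem process_append (a b : List (Int × Int × Char)) (opts : List (Int × Int)) :
    process (a ++ b) opts =
      match process a opts with
      | .inl o => process b o
      | .inr r => .inr r := by
  induction a generalizing opts with
  | nil => rfl
  | cons c rest ih =>
    obtain ⟨x, y, ch⟩ := c
    simp only [List.cons_append, process]
    split_ifs <;> simp [ih]

theorem rowsGoA_eq_process (cx cy : Int) (rows : List String) (y : Int) (opts : List (Int × Int)) :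
    rowsGoA cx cy y rows opts = process (allCells cx cy y rows) opts := by
  induction rows generalizing y opts with
  | nil => rfl
  | cons line rest ih =>
    simp only [rowsGoA, allCells, process_append, rowGoA_eq_process]
    cases process (rowCells cx cy y 0 line.toList) opts <;> simp [ih]

theorem cellAtOff_cons (y t x0 : Int) (c : Char) (cs : List Char) (h : t ≠ x0) :
    cellAtOff y t x0 (c :: cs) = cellAtOff y t (x0 + 1) cs := by
  unfold cellAtOff
  by_cases hle : x0 + 1 ≤ t
  · have h1 : x0 ≤ t := by omega
    have h2 : (t - x0).toNat = (t - (x0 + 1)).toNat + 1 := by omega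
    simp [hle, h1, h2]
  · have h1 : ¬ x0 ≤ t ∨ t = x0 := by omega
    rcases h1 with h1 | h1
    · simp [hle, h1]
    · exact absurd h1 h
theorem cellAtOff_self (y x0 : Int) (c : Char) (cs : List Char) :
    cellAtOff y x0 x0 (c :: cs) = [(x0, y, c)] := by
  simp [cellAtOff]

theorem cellAtOff_nil (y t x0 : Int) : cellAtOff y t x0 [] = [] := by
  unfold cellAtOff; split <;> simp

-- row at y = cy ± 1 : only x = cx matches
theorem rowCells_side (cx cy y : Int) (hy : y = cy - 1 ∨ y = cy + 1) (chars : List Char) (x0 : Int) :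
    rowCells cx cy y x0 chars = cellAtOff y cx x0 chars := by
  induction chars generalizing x0 with
  | nil => simp [rowCells, cellAtOff_nil]
  | cons c cs ih =>
    have hne : cy ≠ y := by omega
    simp only [rowCells]
    by_cases hx : cx = x0
    · have e : cellAtOff y cx (x0 + 1) cs = [] := by
        unfold cellAtOff; rw [if_neg (by omega)]
      rw [if_pos (Or.inl ⟨hx, hy⟩), ih, e, hx, cellAtOff_self]
      simp
    · have hcond : ¬((cx = x0 ∧ (y = cy - 1 ∨ y = cy + 1)) ∨ (cy = y ∧ (x0 = cx - 1 ∨ x0 = cx + 1))) := by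
        intro h; rcases h with ⟨h1, _⟩ | ⟨h1, _⟩
        · exact hx h1
        · exact hne h1
      rw [if_neg hcond, ih, cellAtOff_cons _ _ _ _ _ hx]
      simp

-- row at y = cy : x = cx - 1 then x = cx + 1 match
theorem rowCells_mid (cx cy : Int) (chars : List Char) (x0 : Int) :
    rowCells cx cy cy x0 chars = cellAtOff cy (cx - 1) x0 chars ++ cellAtOff cy (cx + 1) x0 chars := by
  induction chars generalizing x0 with
  | nil => simp [rowCells, cellAtOff_nil]
  | cons c cs ih =>
    rw [rowCells]
    by_cases h1 : x0 = cx - 1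
    · have e1 : cellAtOff cy (cx - 1) (x0 + 1) cs = [] := by
        unfold cellAtOff; rw [if_neg (by omega)]
      have e2 : cellAtOff cy (cx + 1) x0 (c :: cs) = cellAtOff cy (cx + 1) (x0 + 1) cs :=
        cellAtOff_cons _ _ _ _ _ (by omega)
      have e3 : cellAtOff cy (cx - 1) x0 (c :: cs) = [(x0, cy, c)] := by
        rw [← h1, cellAtOff_self]
      rw [if_pos (Or.inr ⟨rfl, Or.inl h1⟩ :
          (cx = x0 ∧ (cy = cy - 1 ∨ cy = cy + 1) ∨ cy = cy ∧ (x0 = cx - 1 ∨ x0 = cx + 1))), ih, e1, e2, e3]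
      simp
    · by_cases h2 : x0 = cx + 1
      · have e1 : cellAtOff cy (cx - 1) x0 (c :: cs) = [] := by
          unfold cellAtOff; rw [if_neg (by omega)]
        have e1' : cellAtOff cy (cx - 1) (x0 + 1) cs = [] := by
          unfold cellAtOff; rw [if_neg (by omega)]
        have e2' : cellAtOff cy (cx + 1) (x0 + 1) cs = [] := by
          unfold cellAtOff; rw [if_neg (by omega)]
        have e3 : cellAtOff cy (cx + 1) x0 (c :: cs) = [(x0, cy, c)] := by
          rw [← h2, cellAtOff_self]
        rw [if_pos (Or.inr ⟨rfl, Or.inr h2⟩ :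
            (cx = x0 ∧ (cy = cy - 1 ∨ cy = cy + 1) ∨ cy = cy ∧ (x0 = cx - 1 ∨ x0 = cx + 1))), ih, e1, e1', e2', e3]
        simp
      · have hcond : ¬((cx = x0 ∧ (cy = cy - 1 ∨ cy = cy + 1)) ∨ (cy = cy ∧ (x0 = cx - 1 ∨ x0 = cx + 1))) := by
          intro h; rcases h with ⟨_, h⟩ | ⟨_, h⟩
          · omega
          · rcases h with h | h
            · exact h1 h
            · exact h2 h
        rw [if_neg hcond, ih,
          cellAtOff_cons _ _ _ _ _ (by omega), cellAtOff_cons _ _ _ _ _ (by omega)]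
        simp

-- any other row matches nothing
theorem rowCells_other (cx cy y : Int) (h : y ≠ cy - 1 ∧ y ≠ cy ∧ y ≠ cy + 1) (chars : List Char) (x0 : Int) :
    rowCells cx cy y x0 chars = [] := by
  induction chars generalizing x0 with
  | nil => rfl
  | cons c cs ih =>
    simp only [rowCells]
    rw [if_neg (by intro hc; rcases hc with ⟨_, hc⟩ | ⟨hc, _⟩ <;> omega), ih]
    simp

theorem gridAt_cons (maze : List String) (line : String) (x y y0 : Int) (h : y ≠ y0) :
    gridAt (line :: maze) x y y0 = gridAt maze x y (y0 + 1) := by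
  unfold gridAt
  by_cases hle : y0 + 1 ≤ y
  · have h1 : y0 ≤ y := by omega
    have h2 : (y - y0).toNat = (y - (y0 + 1)).toNat + 1 := by omega
    simp [hle, h1, h2]
  · have h1 : ¬ y0 ≤ y := by omega
    simp [hle, h1]

theorem gridAt_self (maze : List String) (line : String) (x y0 : Int) :
    gridAt (line :: maze) x y0 y0 = cellAtOff y0 x 0 line.toList := by
  simp [gridAt]

theorem gridAt_nil (x y y0 : Int) : gridAt [] x y y0 = [] := by
  unfold gridAt; split <;> simp

theorem allCells_eq (cx cy : Int) (maze : List String) (y0 : Int) :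
    allCells cx cy y0 maze =
      gridAt maze cx (cy - 1) y0 ++ gridAt maze (cx - 1) cy y0 ++
      gridAt maze (cx + 1) cy y0 ++ gridAt maze cx (cy + 1) y0 := by
  induction maze generalizing y0 with
  | nil => simp [allCells, gridAt_nil]
  | cons line rest ih =>
    simp only [allCells, ih]
    by_cases h1 : y0 = cy - 1
    · rw [h1] at *
      rw [gridAt_self, gridAt_cons _ _ _ _ _ (by omega), gridAt_cons _ _ _ _ _ (by omega),
          gridAt_cons _ _ _ _ _ (by omega),
          rowCells_side cx cy _ (Or.inl rfl)]
      have e1 : gridAt rest cx (cy - 1) (cy - 1 + 1) = [] := by unfold gridAt; rw [if_neg (by omega)]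
      rw [e1]; simp
    · by_cases h2 : y0 = cy
      · rw [h2] at *
        rw [gridAt_self, gridAt_self, gridAt_cons _ _ _ _ _ (by omega),
            gridAt_cons _ _ _ _ _ (by omega), rowCells_mid]
        have e1 : gridAt rest cx (cy - 1) (cy + 1) = [] := by unfold gridAt; rw [if_neg (by omega)]
        have e2 : gridAt rest (cx - 1) cy (cy + 1) = [] := by unfold gridAt; rw [if_neg (by omega)]
        have e3 : gridAt rest (cx + 1) cy (cy + 1) = [] := by unfold gridAt; rw [if_neg (by omega)]
        rw [e1, e2, e3]; simp
      · by_cases h3 : y0 = cy + 1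
        · rw [h3] at *
          rw [gridAt_self, gridAt_cons _ _ _ _ _ (by omega), gridAt_cons _ _ _ _ _ (by omega),
              gridAt_cons _ _ _ _ _ (by omega), rowCells_side cx cy _ (Or.inr rfl)]
          have e1 : gridAt rest cx (cy - 1) (cy + 1 + 1) = [] := by unfold gridAt; rw [if_neg (by omega)]
          have e2 : gridAt rest (cx - 1) cy (cy + 1 + 1) = [] := by unfold gridAt; rw [if_neg (by omega)]
          have e3 : gridAt rest (cx + 1) cy (cy + 1 + 1) = [] := by unfold gridAt; rw [if_neg (by omega)]
          have e4 : gridAt rest cx (cy + 1) (cy + 1 + 1) = [] := by unfold gridAt; rw [if_neg (by omega)]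
          rw [e1, e2, e3, e4]; simp
        · rw [gridAt_cons _ _ _ _ _ (by omega), gridAt_cons _ _ _ _ _ (by omega),
              gridAt_cons _ _ _ _ _ (by omega), gridAt_cons _ _ _ _ _ (by omega),
              rowCells_other cx cy y0 (by omega)]
          simp

theorem gridAt_zero (maze : List String) (x y : Int) :
    gridAt maze x y 0 = (cellAtB maze x y).toList := by
  unfold gridAt cellAtB cellAtOff
  by_cases hy : 0 ≤ y
  · simp only [hy, if_true, Int.sub_zero]
    cases hrow : maze[y.toNat]? with
    | none => simp
    | some line =>
      by_cases hx : 0 ≤ x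
      · simp only [hx, and_self, if_true]
        cases hc : line.toList[x.toNat]? <;> simp
      · simp [hx]
  · simp [hy]

theorem process_eq_findE (cells : List (Int × Int × Char)) (opts : List (Int × Int)) :
    process cells opts =
      match cells.find? (fun c => c.2.2 == 'E') with
      | some (x, y, _) => .inr (x, y)
      | none => .inl (opts ++ (cells.filter (fun c => c.2.2 == ' ')).map (fun c => (c.1, c.2.1))) := by
  induction cells generalizing opts with
  | nil => simp [process]
  | cons c rest ih =>
    obtain ⟨x, y, ch⟩ := c
    simp only [process, List.find?_cons, List.filter_cons]
    by_cases hE : ch = 'E'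
    · simp [hE]
    · by_cases hSp : ch = ' '
      · have : ((' ' == 'E') = false) := by decide
        simp [hSp, this, ih]
      · have h1 : ((ch == 'E') = false) := by simp [hE]
        have h2 : ((ch == ' ') = false) := by simp [hSp]
        simp [hE, hSp, h1, h2, ih]

-- equality of the two step-branch computations
theorem scan_eq (maze : List String) (cx cy : Int) (h : ¬(cx = -1 ∨ cy = -1)) :
    step maze cx cy = step_alt maze cx cy := by
  unfold step step_alt
  rw [if_neg h, if_neg h]
  have hcells : allCells cx cy 0 maze =
      [(cx, cy - 1), (cx - 1, cy), (cx + 1, cy), (cx, cy + 1)].filterMap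
        (fun p => cellAtB maze p.1 p.2) := by
    rw [allCells_eq]
    simp only [gridAt_zero]
    cases h1 : cellAtB maze cx (cy - 1) <;> cases h2 : cellAtB maze (cx - 1) cy <;>
      cases h3 : cellAtB maze (cx + 1) cy <;> cases h4 : cellAtB maze cx (cy + 1) <;>
      simp [*]
  rw [rowsGoA_eq_process, process_eq_findE, hcells]
  cases hf : ([(cx, cy - 1), (cx - 1, cy), (cx + 1, cy), (cx, cy + 1)].filterMap
        (fun p => cellAtB maze p.1 p.2)).find? (fun c => c.2.2 == 'E') with
  | some c => obtain ⟨x, y, ch⟩ := c; rfl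
  | none =>
    simp only [List.nil_append]
    cases hm : (([(cx, cy - 1), (cx - 1, cy), (cx + 1, cy), (cx, cy + 1)].filterMap
        (fun p => cellAtB maze p.1 p.2)).filter (fun c => c.2.2 == ' ')).map
        (fun c => (c.1, c.2.1)) with
    | nil => rfl
    | cons p rest => obtain ⟨x, y⟩ := p; rfl

-- start branch: per-row scan equals index of first 'S'
theorem startRowA_eq (y : Int) (chars : List Char) (x : Int) :
    startRowA y x chars =
      match PySem.List.index? chars 'S' with
      | some i => some ("S", x + (i : Int), y, ([] : List (Int × Int)))
      | none => none := by
  induction chars generalizing x with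
  | nil => simp [startRowA, PySem.List.index?]
  | cons c cs ih =>
    by_cases h : c = 'S'
    · subst h
      rw [PySem.List.index?_cons_self]
      simp [startRowA]
    · rw [startRowA, if_neg h, ih, PySem.List.index?_cons_of_ne _ (by simp [h])]
      cases hidx : PySem.List.index? cs 'S' with
      | none => simp
      | some i =>
        simp only [Option.map_some]
        simp
        omega

theorem startA_eq (maze : List String) (y : Int) (hS : ∃ l ∈ maze, 'S' ∈ l.toList) :
    (match startA y maze with
      | some r => r
      | none => ("", 0, 0, ([] : List (Int × Int)))) = findSB y maze := by
  induction maze generalizing y with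
  | nil => simp at hS
  | cons line rest ih =>
    simp only [startA, findSB, startRowA_eq]
    by_cases h : lineHas 'S' line
    · have hmem : 'S' ∈ line.toList := by simpa [lineHas] using h
      have hsome : (PySem.List.index? line.toList 'S').isSome :=
        (PySem.List.index?_isSome_iff _ _).mpr hmem
      obtain ⟨i, hi⟩ := Option.isSome_iff_exists.mp hsome
      rw [hi]
      simp [h]
    · have hmem : 'S' ∉ line.toList := by simpa [lineHas] using h
      rw [(PySem.List.index?_eq_none_iff _ _).mpr hmem]
      have hS' : ∃ l ∈ rest, 'S' ∈ l.toList := by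
        rcases hS with ⟨l, hl, hmem'⟩
        rcases List.mem_cons.mp hl with hl | hl
        · exact absurd (hl ▸ hmem') hmem
        · exact ⟨l, hl, hmem'⟩
      simp [h, ih _ hS']

-- validate succeeds iff some line has 'S' and some line has 'E'
theorem validate_fold (maze : List String) (a b : Int) :
    maze.foldl (fun (p : Int × Int) line =>
      (if lineHas 'S' line then p.1 + 1 else p.1,
       if lineHas 'E' line then p.2 + 1 else p.2)) (a, b) =
    (a + (maze.countP (lineHas 'S') : Int), b + (maze.countP (lineHas 'E') : Int)) := by
  induction maze generalizing a b with
  | nil => simp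
  | cons line rest ih =>
    simp only [List.foldl_cons, ih, List.countP_cons]
    split_ifs <;> simp_all [Prod.ext_iff] <;> omega

theorem countP_ne_zero_of_any (maze : List String) (c : Char) (h : maze.any (lineHas c) = true) :
    maze.countP (lineHas c) ≠ 0 := by
  rw [Ne, List.countP_eq_zero]
  simp only [List.any_eq_true] at h
  rcases h with ⟨l, hl, hp⟩
  intro hall
  exact absurd hp (by simpa using hall l hl)

theorem countP_eq_zero_of_not_any (maze : List String) (c : Char) (h : maze.any (lineHas c) = false) :
    maze.countP (lineHas c) = 0 := by
  rw [List.countP_eq_zero]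
  intro l hl
  rw [List.any_eq_false] at h
  simpa using h l hl

theorem validateA_iff (maze : List String) :
    validateA maze = ((maze.any (lineHas 'S')) && (maze.any (lineHas 'E'))) := by
  unfold validateA
  rw [validate_fold]
  have h1 : (((0 : Int) + (maze.countP (lineHas 'S') : Int)) == 0) = !maze.any (lineHas 'S') := by
    cases h : maze.any (lineHas 'S') with
    | true =>
      have := countP_ne_zero_of_any maze 'S' h
      simp only [Bool.not_true, beq_eq_false_iff_ne, Ne]
      intro hc; apply this; omega
    | false =>
      have h0 := countP_eq_zero_of_not_any maze 'S' h
      simp [h0]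
  have h2 : (((0 : Int) + (maze.countP (lineHas 'E') : Int)) == 0) = !maze.any (lineHas 'E') := by
    cases h : maze.any (lineHas 'E') with
    | true =>
      have := countP_ne_zero_of_any maze 'E' h
      simp only [Bool.not_true, beq_eq_false_iff_ne, Ne]
      intro hc; apply this; omega
    | false =>
      have h0 := countP_eq_zero_of_not_any maze 'E' h
      simp [h0]
  simp only []
  rw [h1, h2]
  cases maze.any (lineHas 'S') <;> cases maze.any (lineHas 'E') <;> rfl

-- ===== VERDICT (by name: the statement is the Claim_ definition above) =====
theorem step_spec : Claim_equal_step := by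
  intro maze cx cy _hDom hPre
  unfold Spec_step
  by_cases hstart : cx = -1 ∨ cy = -1
  · unfold step step_alt
    rw [if_pos hstart, if_pos hstart]
    obtain ⟨hS, hE⟩ := hPre.1 hstart
    have hSany : maze.any (lineHas 'S') = true := by
      simp only [List.any_eq_true]; rcases hS with ⟨l, hl, hm⟩; exact ⟨l, hl, by simp [lineHas, hm]⟩
    have hEany : maze.any (lineHas 'E') = true := by
      simp only [List.any_eq_true]; rcases hE with ⟨l, hl, hm⟩; exact ⟨l, hl, by simp [lineHas, hm]⟩
    rw [validateA_iff, hSany, hEany]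
    simp only [Bool.and_self, if_pos]
    exact startA_eq maze 0 hS
  · exact scan_eq maze cx cy hstart
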